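-- pv_equiv track=rewrite | github.com/AlexBuseDragomir/sparse-3d-matrix-operations | Sparse 3D matrix operations (procedural)/module.py | get_matrix_size
-- ===== SOURCE A (Python) =====
-- def get_matrix_size(list_of_elements):
--     # initialisation of rows, columns and pages
--     rows = -1
--     columns = -1
--     pages = -1
--
--     # we get the minimum number of rows, columns and pages
--     # that are necessary in order to encapsulate all elements from input
--     for iterator in range(0, len(list_of_elements), 1):
--
--         if list_of_elements[iterator][0] > rows:
--             rows = list_of_elements[iterator][0]
--
--         if list_of_elements[iterator][1] > columns:
--             columns = list_of_elements[iterator][1]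
--
--         if list_of_elements[iterator][2] > pages:
--             pages = list_of_elements[iterator][2]
--
--     # we return a tuple containing the number of rows, columns and matrix pages
--     return (rows + 1, columns + 1, pages + 1)
-- ===== SOURCE B (Python) =====
-- def get_matrix_size(list_of_elements):
--     if not list_of_elements:
--         return (0, 0, 0)
--     return _bounding_size(list_of_elements)
--
--
-- def _bounding_size(elems):
--     # divide and conquer over a nonempty slice of elements
--     if len(elems) == 1:
--         r, c, p = elems[0][0], elems[0][1], elems[0][2]
--         # a dimension of a bounding box is never negative
--         return (max(r + 1, 0), max(c + 1, 0), max(p + 1, 0))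
--     mid = len(elems) // 2
--     left = _bounding_size(elems[:mid])
--     right = _bounding_size(elems[mid:])
--     return (max(left[0], right[0]), max(left[1], right[1]), max(left[2], right[2]))
-- ===== Notes on version B (the rewrite author's own statement) =====
-- stated objective: alternative
-- what changed: A's single fused left-to-right loop maintaining three max-coordinate accumulators seeded with -1 is replaced by a divide-and-conquer recursion that computes the bounding size (coordinates already +1, clamped at 0) of each half and merges the two sizes componentwise with max.
import Mathlib
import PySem

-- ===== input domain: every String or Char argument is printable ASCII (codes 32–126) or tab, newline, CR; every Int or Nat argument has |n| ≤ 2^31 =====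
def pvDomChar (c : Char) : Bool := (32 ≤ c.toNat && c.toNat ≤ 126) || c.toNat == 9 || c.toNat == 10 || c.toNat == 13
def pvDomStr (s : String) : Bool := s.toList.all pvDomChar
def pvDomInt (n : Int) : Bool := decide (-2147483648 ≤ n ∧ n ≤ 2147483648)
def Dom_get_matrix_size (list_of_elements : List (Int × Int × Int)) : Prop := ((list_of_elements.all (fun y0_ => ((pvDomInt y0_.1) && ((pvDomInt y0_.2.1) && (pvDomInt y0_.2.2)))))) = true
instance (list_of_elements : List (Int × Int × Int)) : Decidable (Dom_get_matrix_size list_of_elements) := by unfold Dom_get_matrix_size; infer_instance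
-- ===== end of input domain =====

-- B replaces A's fused left-to-right three-accumulator loop by a divide-and-conquer
-- recursion merging the bounding sizes of the two halves (alternative algorithm).

-- ===== PORT A =====
-- A: one index loop over the list, three accumulators updated by explicit if-comparisons.
def get_matrix_size (list_of_elements : List (Int × Int × Int)) : Int × Int × Int :=
  let acc := list_of_elements.foldl
    (fun (acc : Int × Int × Int) e =>
      let rows := if e.1 > acc.1 then e.1 else acc.1
      let columns := if e.2.1 > acc.2.1 then e.2.1 else acc.2.1
      let pages := if e.2.2 > acc.2.2 then e.2.2 else acc.2.2
      (rows, columns, pages))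
    (-1, -1, -1)
  (acc.1 + 1, acc.2.1 + 1, acc.2.2 + 1)

-- ===== PORT B =====
-- B helper: divide and conquer over a nonempty list (elems[:mid] / elems[mid:] → take / drop).
def pvBoundingSize : List (Int × Int × Int) → Int × Int × Int
  | [] => (0, 0, 0)  -- unreachable: only called on nonempty lists
  | [e] => (max (e.1 + 1) 0, max (e.2.1 + 1) 0, max (e.2.2 + 1) 0)
  | e1 :: e2 :: rest =>
    let elems := e1 :: e2 :: rest
    let mid := elems.length / 2
    let left := pvBoundingSize (elems.take mid)
    let right := pvBoundingSize (elems.drop mid)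
    (max left.1 right.1, max left.2.1 right.2.1, max left.2.2 right.2.2)
  termination_by l => l.length
  decreasing_by
    · simp [List.length_take]; omega
    · simp [List.length_drop]; omega

def get_matrix_size_alt (list_of_elements : List (Int × Int × Int)) : Int × Int × Int :=
  if list_of_elements.isEmpty then (0, 0, 0)
  else pvBoundingSize list_of_elements

-- ===== PRECONDITION & SPEC =====
def Spec_get_matrix_size (list_of_elements : List (Int × Int × Int)) (out : Int × Int × Int) : Prop := out = get_matrix_size_alt list_of_elements
instance (list_of_elements : List (Int × Int × Int)) (out : Int × Int × Int) : Decidable (Spec_get_matrix_size list_of_elements out) := by unfold Spec_get_matrix_size; infer_instance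

-- ===== CLAIM (what is proved, stated in full; the proofs are below) =====
def Claim_equal_get_matrix_size : Prop := ∀ (list_of_elements : List (Int × Int × Int)), Dom_get_matrix_size list_of_elements → Spec_get_matrix_size list_of_elements (get_matrix_size list_of_elements)

-- ===== LEMMAS AND PROOFS =====

-- the common specification: per-dimension max of the clamped sizes, seeded with 0
def pvSz (f : (Int × Int × Int) → Int) (l : List (Int × Int × Int)) : Int :=
  (l.map (fun e => max (f e + 1) 0)).foldl max 0

theorem le_foldl_max (xs : List Int) (a : Int) : a ≤ xs.foldl max a := by
  induction xs generalizing a with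
  | nil => simp
  | cons x t ih => exact le_trans (le_max_left a x) (ih (max a x))

theorem foldl_max_split (xs : List Int) (a b : Int) :
    xs.foldl max (max a b) = max a (xs.foldl max b) := by
  induction xs generalizing b with
  | nil => simp
  | cons x t ih => simpa [max_assoc] using ih (max b x)

theorem pvSz_nonneg (f : (Int × Int × Int) → Int) (l : List (Int × Int × Int)) :
    0 ≤ pvSz f l := le_foldl_max _ 0

theorem pvSz_append (f : (Int × Int × Int) → Int) (l1 l2 : List (Int × Int × Int)) :
    pvSz f (l1 ++ l2) = max (pvSz f l1) (pvSz f l2) := by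
  have h1 : pvSz f (l1 ++ l2)
      = (l2.map (fun e => max (f e + 1) 0)).foldl max (pvSz f l1) := by
    simp [pvSz, List.foldl_append]
  rw [h1, ← max_eq_left (pvSz_nonneg f l1), foldl_max_split]
  simp only [pvSz]
  rw [max_eq_left (le_foldl_max _ 0)]

theorem pvSz_single (f : (Int × Int × Int) → Int) (e : Int × Int × Int) :
    pvSz f [e] = max (f e + 1) 0 := by
  simp [pvSz]

theorem foldl_max_shift (xs : List Int) (a : Int) :
    xs.foldl max a + 1 = (xs.map (fun x => x + 1)).foldl max (a + 1) := by
  induction xs generalizing a with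
  | nil => simp
  | cons x t ih =>
    simp only [List.foldl_cons, List.map_cons, ih]
    congr 1
    simp [max_def]; split_ifs <;> omega

theorem foldl_max_clamp (xs : List Int) (a : Int) (ha : 0 ≤ a) :
    xs.foldl max a = (xs.map (fun x => max x 0)).foldl max a := by
  induction xs generalizing a with
  | nil => simp
  | cons x t ih =>
    simp only [List.foldl_cons, List.map_cons]
    have h1 : max a x = max a (max x 0) := by
      simp [max_def]; split_ifs <;> omega
    rw [h1, ih _ (le_trans ha (le_max_left a (max x 0)))]


-- B's divide and conquer equals the componentwise spec on nonempty lists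
theorem pvBoundingSize_eq_pvSz : ∀ (n : Nat) (l : List (Int × Int × Int)), l.length ≤ n → l ≠ [] →
    pvBoundingSize l = (pvSz (fun e => e.1) l, pvSz (fun e => e.2.1) l, pvSz (fun e => e.2.2) l) := by
  intro n
  induction n with
  | zero => intro l hl hne; cases l with
    | nil => exact absurd rfl hne
    | cons h t => simp at hl
  | succ n ih =>
    intro l hl hne
    match l with
    | [] => exact absurd rfl hne
    | [e] => simp [pvBoundingSize, pvSz_single]
    | e1 :: e2 :: rest =>
      rw [pvBoundingSize]
      set L := e1 :: e2 :: rest with hL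
      set mid := L.length / 2 with hmid
      have hLlen : L.length = rest.length + 2 := by simp [hL]
      have hl' : L.length ≤ n + 1 := by simpa [hL] using hl
      have hm1 : 1 ≤ mid := by omega
      have hm2 : mid < L.length := by omega
      have htake : (L.take mid).length ≤ n := by
        simp [List.length_take]; omega
      have hdrop : (L.drop mid).length ≤ n := by
        simp [List.length_drop]; omega
      have htne : L.take mid ≠ [] := by
        intro h; have := congrArg List.length h
        simp [List.length_take] at this; omega
      have hdne : L.drop mid ≠ [] := by
        intro h; have := congrArg List.length h
        simp [List.length_drop] at this; omega
      rw [ih _ htake htne, ih _ hdrop hdne]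
      have hsplit : L = L.take mid ++ L.drop mid := (List.take_append_drop mid L).symm
      simp only [Prod.mk.injEq]
      refine ⟨?_, ?_, ?_⟩ <;> (conv_rhs => rw [hsplit]) <;> rw [pvSz_append]

-- A's fused fold splits into three component folds of max
theorem get_matrix_size_fold (l : List (Int × Int × Int)) (r c p : Int) :
    l.foldl
      (fun (acc : Int × Int × Int) e =>
        let rows := if e.1 > acc.1 then e.1 else acc.1
        let columns := if e.2.1 > acc.2.1 then e.2.1 else acc.2.1
        let pages := if e.2.2 > acc.2.2 then e.2.2 else acc.2.2
        (rows, columns, pages))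
      (r, c, p)
    = ((l.map (fun e => e.1)).foldl max r,
       (l.map (fun e => e.2.1)).foldl max c,
       (l.map (fun e => e.2.2)).foldl max p) := by
  induction l generalizing r c p with
  | nil => simp
  | cons h t ih =>
    simp only [List.foldl_cons, List.map_cons, ih]
    congr 1 <;> [skip; congr 1] <;>
      (congr 1; simp [max_def]; split_ifs <;> omega)

-- A equals the componentwise spec
theorem get_matrix_size_eq_pvSz (l : List (Int × Int × Int)) :
    get_matrix_size l = (pvSz (fun e => e.1) l, pvSz (fun e => e.2.1) l, pvSz (fun e => e.2.2) l) := by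
  unfold get_matrix_size
  simp only [get_matrix_size_fold]
  have comp : ∀ (f : (Int × Int × Int) → Int),
      (l.map f).foldl max (-1) + 1 = pvSz f l := by
    intro f
    rw [foldl_max_shift]
    norm_num
    rw [foldl_max_clamp _ 0 le_rfl]
    simp [pvSz, List.map_map, Function.comp_def]
  simp only [comp]

-- ===== VERDICT (by name: the statement is the Claim_ definition above) =====
theorem get_matrix_size_spec : Claim_equal_get_matrix_size := by
  intro l _
  unfold Spec_get_matrix_size get_matrix_size_alt
  cases l with
  | nil => rfl
  | cons h t =>
    rw [if_neg (by simp)]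
    rw [get_matrix_size_eq_pvSz,
        pvBoundingSize_eq_pvSz (h :: t).length (h :: t) le_rfl (by simp)]
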